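-- pv_equiv track=rewrite | github.com/dalphakr/oi-LightRAG | lightrag/tools/migrate_rag_storage_to_postgres.py | _batch_dict_items
-- ===== SOURCE A (Python) =====
-- from typing import Any, Iterable
--
-- def _batch_dict_items(
--     data: dict[str, Any], batch_size: int
-- ) -> Iterable[dict[str, Any]]:
--     batch: dict[str, Any] = {}
--     for key, value in data.items():
--         batch[key] = value
--         if len(batch) >= batch_size:
--             yield batch
--             batch = {}
--     if batch:
--         yield batch
-- ===== SOURCE B (Python) =====
-- from typing import Any, Iterable
--
--
-- def _batch_dict_items(
--     data: dict[str, Any], batch_size: int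
-- ) -> Iterable[dict[str, Any]]:
--     # Slice the materialized item list into fixed-size chunks.
--     # A size <= 1 behaves like 1 (A emits one-item batches there and never errors).
--     size = max(1, batch_size)
--     items = list(data.items())
--     while items:
--         yield dict(items[:size])
--         items = items[size:]
-- ===== Notes on version B (the rewrite author's own statement) =====
-- stated objective: simpler
-- what changed: A accumulates a batch item by item and tests its length after every insertion; B materializes the item list once and slices it into fixed-size chunks (size = max(1, batch_size)) in a plain while loop, with no per-item counter or flush logic.
import Mathlib
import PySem

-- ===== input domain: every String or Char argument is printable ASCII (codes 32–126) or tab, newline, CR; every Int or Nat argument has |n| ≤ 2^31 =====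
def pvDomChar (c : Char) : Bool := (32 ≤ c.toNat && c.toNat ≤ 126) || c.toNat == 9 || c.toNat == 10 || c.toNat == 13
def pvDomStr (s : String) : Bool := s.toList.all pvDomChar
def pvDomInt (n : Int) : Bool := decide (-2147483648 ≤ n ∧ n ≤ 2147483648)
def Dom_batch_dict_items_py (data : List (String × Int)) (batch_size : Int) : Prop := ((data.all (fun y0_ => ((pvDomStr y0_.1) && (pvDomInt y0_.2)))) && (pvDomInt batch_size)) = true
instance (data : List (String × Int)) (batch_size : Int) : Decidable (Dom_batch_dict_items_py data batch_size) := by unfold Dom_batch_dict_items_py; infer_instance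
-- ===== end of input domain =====

-- B slices the item list into fixed-size chunks instead of A's accumulate-and-flush loop; same output, simpler shape.

-- ===== PORT A =====
-- the generator loop: batch[key] = value; flush when len(batch) >= batch_size; trailing 'if batch: yield batch'
def batchGoA (bs : Int) : List (String × Int) → PySem.Dict String Int → List (List (String × Int))
  | [], batch => if batch.items ≠ [] then [batch.items] else []
  | (k, v) :: rest, batch =>
      let b := batch.insert k v
      if (b.size : Int) ≥ bs then b.items :: batchGoA bs rest PySem.Dict.empty
      else batchGoA bs rest b

def batch_dict_items_py (data : List (String × Int)) (batch_size : Int) : List (List (String × Int)) :=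
  batchGoA batch_size data PySem.Dict.empty

-- ===== PORT B =====
-- 'while items: yield dict(items[:size]); items = items[size:]' — the nonnegative in-range slices are take/drop;
-- the 'max 1 n' in the recursive call only guards totality: B always calls this with n = max(1, batch_size) ≥ 1.
def pyChunksB (n : Nat) (items : List (String × Int)) : List (List (String × Int)) :=
  if items = [] then [] else items.take n :: pyChunksB n (items.drop (max 1 n))
termination_by items.length
decreasing_by
  cases items with
  | nil => simp_all
  | cons x xs => simp [List.length_drop]

def batch_dict_items_py_alt (data : List (String × Int)) (batch_size : Int) : List (List (String × Int)) :=
  pyChunksB (max 1 batch_size).toNat data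

-- ===== PRECONDITION & SPEC =====
-- Pre_ excludes association lists with duplicate keys: A's parameter is a Python dict, which cannot
-- contain a duplicate key, so such lists do not represent any actual input of A.
def Pre_batch_dict_items_py (data : List (String × Int)) (batch_size : Int) : Prop :=
  (data.map Prod.fst).Nodup
instance (data : List (String × Int)) (batch_size : Int) : Decidable (Pre_batch_dict_items_py data batch_size) := by unfold Pre_batch_dict_items_py; infer_instance

def pvWitness_batch_dict_items_py : (List (String × Int)) × Int := ([("a", 1), ("b", 2), ("c", 3)], 2)

def Spec_batch_dict_items_py (data : List (String × Int)) (batch_size : Int) (out : List (List (String × Int))) : Prop := out = batch_dict_items_py_alt data batch_size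
instance (data : List (String × Int)) (batch_size : Int) (out : List (List (String × Int))) : Decidable (Spec_batch_dict_items_py data batch_size out) := by unfold Spec_batch_dict_items_py; infer_instance

-- ===== CLAIM (what is proved, stated in full; the proofs are below) =====
def Claim_equal_batch_dict_items_py : Prop := ∀ (data : List (String × Int)) (batch_size : Int), Dom_batch_dict_items_py data batch_size → Pre_batch_dict_items_py data batch_size → Spec_batch_dict_items_py data batch_size (batch_dict_items_py data batch_size)

-- ===== LEMMAS AND PROOFS =====

lemma dictEmptyItems : (PySem.Dict.empty : PySem.Dict String Int).items = [] := rfl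

lemma pyChunksB_nil (n : Nat) : pyChunksB n [] = [] := by
  rw [pyChunksB]; simp

lemma pyChunksB_ne (n : Nat) (l : List (String × Int)) (h : l ≠ []) :
    pyChunksB n l = l.take n :: pyChunksB n (l.drop (max 1 n)) := by
  rw [pyChunksB]; simp [h]

-- the inner loop with a partially filled batch equals chunking of (batch.items ++ remaining items)
lemma batchGoA_eq_chunks (bs : Int) (n : Nat) (hn : n = (max 1 bs).toNat) :
    ∀ (l : List (String × Int)) (batch : PySem.Dict String Int),
      ((batch.items ++ l).map Prod.fst).Nodup →
      batch.items.length < n →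
      batchGoA bs l batch = pyChunksB n (batch.items ++ l) := by
  have hmx : (1 : Int) ≤ max 1 bs := le_max_left 1 bs
  have hn1 : 1 ≤ n := by omega
  intro l
  induction l with
  | nil =>
    intro batch _ hlen
    simp only [List.append_nil, batchGoA]
    by_cases hb : batch.items = []
    · simp [hb, pyChunksB_nil]
    · rw [pyChunksB_ne n _ hb]
      have htake : batch.items.take n = batch.items :=
        List.take_of_length_le (by omega)
      have hdrop : batch.items.drop (max 1 n) = [] :=
        List.drop_eq_nil_of_le (by omega)
      simp [hb, htake, hdrop, pyChunksB_nil]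
  | cons p rest ih =>
    rcases p with ⟨k, v⟩
    intro batch hnd hlen
    -- k is fresh for batch, so the insert appends
    have hnd' : (batch.items.map Prod.fst ++ k :: rest.map Prod.fst).Nodup := by
      simpa using hnd
    rcases List.nodup_append.mp hnd' with ⟨h1, h2, h3⟩
    have hknot : k ∉ batch.items.map Prod.fst := fun hk => h3 k hk k (by simp) rfl
    have hcont : batch.contains k = false := by
      rw [← Bool.not_eq_true, PySem.Dict.contains_iff_mem_keys]
      exact hknot
    have hitems : (batch.insert k v).items = batch.items ++ [(k, v)] :=
      PySem.Dict.items_insert_of_not_contains batch v hcont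
    have hsize : ((batch.insert k v).size : Int) = (batch.items.length : Int) + 1 := by
      simp [PySem.Dict.size, hitems]
    simp only [batchGoA, hitems, hsize]
    split_ifs with hge
    · -- flush: the batch has reached size n exactly
      have hfull : batch.items.length + 1 = n := by
        have h4 : max 1 bs ≤ (batch.items.length + 1 : Int) := by
          rcases max_cases 1 bs with ⟨he, _⟩ | ⟨he, _⟩ <;> rw [he] <;> omega
        omega
      have hne : batch.items ++ ((k, v) :: rest) ≠ [] := by simp
      rw [pyChunksB_ne n _ hne]
      have hlen2 : (batch.items ++ [(k, v)]).length = n := by simp; omega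
      have hsplit : batch.items ++ (k, v) :: rest = (batch.items ++ [(k, v)]) ++ rest := by simp
      have htake : (batch.items ++ ((k, v) :: rest)).take n = batch.items ++ [(k, v)] := by
        rw [hsplit]; exact List.take_left' hlen2
      have hdrop : (batch.items ++ ((k, v) :: rest)).drop (max 1 n) = rest := by
        have hm : max 1 n = n := by omega
        rw [hm, hsplit]; exact List.drop_left' hlen2
      have hrest : (rest.map Prod.fst).Nodup := (List.nodup_cons.mp h2).2
      have hih := ih PySem.Dict.empty (by simpa [dictEmptyItems] using hrest)
        (by rw [dictEmptyItems]; simpa using hn1)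
      rw [htake, hdrop, hih, dictEmptyItems, List.nil_append]
    · -- keep accumulating
      have hlt : batch.items.length + 1 < n := by
        have h4 : (batch.items.length + 1 : Int) < max 1 bs := by
          rcases max_cases 1 bs with ⟨he, _⟩ | ⟨he, _⟩ <;> rw [he] <;> omega
        omega
      have hih := ih (batch.insert k v)
        (by rw [hitems, List.append_assoc]; simpa using hnd)
        (by rw [hitems]; simp; omega)
      rw [hih, hitems, List.append_assoc]
      simp

-- ===== VERDICT (by name: the statement is the Claim_ definition above) =====
theorem batch_dict_items_py_spec : Claim_equal_batch_dict_items_py := by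
  intro data bs _ hpre
  unfold Spec_batch_dict_items_py batch_dict_items_py batch_dict_items_py_alt
  have hmx : (1 : Int) ≤ max 1 bs := le_max_left 1 bs
  have h := batchGoA_eq_chunks bs ((max 1 bs).toNat) rfl data PySem.Dict.empty
    (by simpa [dictEmptyItems] using hpre) (by rw [dictEmptyItems]; simp)
  rw [h, dictEmptyItems, List.nil_append]
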